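-- pv_equiv track=rewrite | github.com/JonSteinn/Kattis-Solutions | src/Summer Trip/Python 3/main.py | count
-- ===== SOURCE A (Python) =====
-- def ones(n):
--     count = 0
--     while n:
--         n &= (n-1)
--         count += 1
--     return count
--
-- def count(w):
--     counter = 0
--     since_last = (lambda z: [1<<z]*z + [0] + [1<<z]*(25-z))(ord(w[0])-97)
--     for char in w[1:]:
--         val = ord(char)-97
--         counter += ones(since_last[val])
--         for i in range(26):
--             since_last[i] |= 1 << val
--         since_last[val] = 0
--     return counter
-- ===== SOURCE B (Python) =====
-- def count(w):
--     last = [-1] * 26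
--     last[ord(w[0]) - 97] = 0
--     total = 0
--     i = 1
--     for ch in w[1:]:
--         val = ord(ch) - 97
--         prev = last[val]
--         total += sum(1 for j in range(26) if last[j] > prev)
--         last[val] = i
--         i += 1
--     return total
-- ===== Notes on version B (the rewrite author's own statement) =====
-- stated objective: simpler
-- what changed: Replaces the 26 OR-accumulated bitmasks plus the bit-clearing popcount helper by a single last-occurrence index array: for each letter it counts the indices j with last[j] greater than the previous occurrence of that letter, so the popcount helper and the 26-wide OR update disappear.
-- outside the precondition, e.g. on count('{'): A returns 0, B raises IndexError; on count('{{'): A returns 0, B raises IndexError; on count('{ab{a'): A returns 5, B raises IndexError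
import Mathlib
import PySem

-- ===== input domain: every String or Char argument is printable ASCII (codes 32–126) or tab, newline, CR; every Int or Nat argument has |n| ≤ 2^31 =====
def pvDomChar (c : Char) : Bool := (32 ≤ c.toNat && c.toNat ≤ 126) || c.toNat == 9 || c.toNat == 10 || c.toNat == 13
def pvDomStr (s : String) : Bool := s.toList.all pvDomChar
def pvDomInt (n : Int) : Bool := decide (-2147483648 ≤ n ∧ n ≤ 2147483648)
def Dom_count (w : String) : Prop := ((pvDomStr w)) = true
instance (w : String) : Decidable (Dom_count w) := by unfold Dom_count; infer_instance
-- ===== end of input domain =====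

-- B replaces A's 26 OR-accumulated bitmasks and the bit-clearing popcount helper by a single
-- last-occurrence index array (simpler, same O(26·n) cost); return values proved equal on Pre_count.

-- ===== PORT A =====
-- ones(n): Python's `while n: n &= n-1; count += 1`.  All arguments here are nonnegative
-- bitmasks, so Nat is exact for the Python int.
def ones (n : Nat) : Nat :=
  if h : n = 0 then 0 else ones (n &&& (n - 1)) + 1
decreasing_by
  have h2 : n &&& (n - 1) ≤ n - 1 := Nat.and_le_right
  omega

-- loop body of A's `for char in w[1:]`; state = (counter, since_last)
def stepA (st : Int × List Nat) (c : Char) : Int × List Nat :=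
  let val : Nat := c.toNat - 97                                  -- ord(char) - 97; exact on Pre_count (lowercase chars)
  let counter : Int := st.1 + (ones (st.2.getD val 0) : Int)     -- since_last[val]; val is in range on Pre_count
  let sl := (List.range 26).foldl (fun l i => l.set i ((l.getD i 0) ||| (1 <<< val))) st.2  -- since_last[i] |= 1 << val
  (counter, sl.set val 0)                                        -- since_last[val] = 0

def count (w : String) : Int :=
  let cs := w.toList
  let z : Nat := (cs.headD ' ').toNat - 97                       -- ord(w[0]) - 97; w nonempty and lowercase on Pre_count
  let init : List Nat := List.replicate z (1 <<< z) ++ [0] ++ List.replicate (25 - z) (1 <<< z)  -- [1<<z]*z + [0] + [1<<z]*(25-z)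
  ((cs.drop 1).foldl stepA (0, init)).1

-- ===== PORT B =====
-- loop body of B's `for ch in w[1:]`; state = (total, last, i)
def stepB (st : Int × List Int × Int) (ch : Char) : Int × List Int × Int :=
  let val : Nat := ch.toNat - 97                                 -- ord(ch) - 97; exact on Pre_count (lowercase chars)
  let prev : Int := st.2.1.getD val (-1)                         -- last[val]; val is in range on Pre_count
  let total : Int := st.1 + ((List.range 26).countP (fun j => decide (prev < st.2.1.getD j (-1))) : Int)  -- sum(1 for j … if last[j] > prev)
  (total, st.2.1.set val st.2.2, st.2.2 + 1)                     -- last[val] = i; i += 1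

def count_alt (w : String) : Int :=
  let cs := w.toList
  let last0 : List Int := (List.replicate 26 (-1 : Int)).set ((cs.headD ' ').toNat - 97) 0  -- last = [-1]*26; last[ord(w[0])-97] = 0
  ((cs.drop 1).foldl stepB (0, last0, 1)).1

-- ===== PRECONDITION & SPEC =====
-- Pre_count restricts to nonempty strings of lowercase letters (codes 97..122), the problem's stated
-- domain: on other inputs A raises IndexError or ValueError, EXCEPT that A accidentally also returns a
-- count when the first character has code 123 (building a length-27 list) and the remaining characters
-- have codes 97..123; B raises IndexError there, so those inputs are excluded too (see claim cites).
def Pre_count (w : String) : Prop :=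
  w.toList ≠ [] ∧ (w.toList.all (fun c => 97 ≤ c.toNat && c.toNat ≤ 122)) = true
instance (w : String) : Decidable (Pre_count w) := by unfold Pre_count; infer_instance

def pvWitness_count : String := "abca"

def Spec_count (w : String) (out : Int) : Prop := out = count_alt w
instance (w : String) (out : Int) : Decidable (Spec_count w out) := by unfold Spec_count; infer_instance

-- ===== CLAIM (what is proved, stated in full; the proofs are below) =====
def Claim_equal_count : Prop := ∀ (w : String), Dom_count w → Pre_count w → Spec_count w (count w)

-- ===== LEMMAS AND PROOFS =====

-- `(l.set i x).getD j d` spelled out (both element types are used below)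
theorem getD_set {α : Type} (l : List α) (i j : Nat) (x d : α) :
    (l.set i x).getD j d = if i = j ∧ i < l.length then x else l.getD j d := by
  simp only [List.getD_eq_getElem?_getD, List.getElem?_set]
  by_cases h1 : i = j
  · subst h1
    by_cases h2 : i < l.length
    · simp [h2]
    · rw [List.getElem?_eq_none (show l.length ≤ i by omega)]
      simp [h2]
  · simp [h1]

-- the number whose binary digits below n are given by P
def maskOf (P : Nat → Bool) : Nat → Nat
  | 0 => 0
  | n + 1 => maskOf P n + (if P n then 2 ^ n else 0)

theorem maskOf_lt (P : Nat → Bool) (n : Nat) : maskOf P n < 2 ^ n := by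
  induction n with
  | zero => simp [maskOf]
  | succ n ih =>
    have h2 : (2:Nat) ^ (n+1) = 2 ^ n + 2 ^ n := by ring
    simp only [maskOf]; split_ifs <;> omega

theorem testBit_add_pow {a m : Nat} (h : a < 2 ^ m) (j : Nat) :
    (a + 2 ^ m).testBit j = (a.testBit j || decide (j = m)) := by
  rcases lt_trichotomy j m with hj | rfl | hj
  · have hne : ¬ (j = m) := by omega
    rw [Nat.testBit_eq_decide_div_mod_eq, Nat.testBit_eq_decide_div_mod_eq]
    have hpow : (2:Nat) ^ m = 2 ^ j * (2 * 2 ^ (m - j - 1)) := by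
      rw [← pow_succ']
      rw [← pow_add]
      congr 1
      omega
    rw [hpow, Nat.add_mul_div_left _ _ (Nat.two_pow_pos j), Nat.add_mul_mod_self_left]
    simp [hne]
  · have h0 : a / 2 ^ j = 0 := Nat.div_eq_of_lt h
    rw [Nat.testBit_eq_decide_div_mod_eq, Nat.testBit_eq_false_of_lt h]
    rw [Nat.add_div_right _ (Nat.two_pow_pos j), h0]
    simp
  · have h1 : a + 2 ^ m < 2 ^ j := by
      have : (2:Nat) ^ (m+1) ≤ 2 ^ j := Nat.pow_le_pow_right (by omega) (by omega)
      have : (2:Nat) ^ (m+1) = 2 ^ m + 2 ^ m := by ring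
      omega
    have h2 : a < 2 ^ j := by omega
    rw [Nat.testBit_eq_false_of_lt h1, Nat.testBit_eq_false_of_lt h2]
    simp; omega

theorem and_add_pow {a b m : Nat} (ha : a < 2 ^ m) (hb : b < 2 ^ m) :
    (a + 2 ^ m) &&& (b + 2 ^ m) = (a &&& b) + 2 ^ m := by
  have hab : a &&& b < 2 ^ m := lt_of_le_of_lt Nat.and_le_left ha
  apply Nat.eq_of_testBit_eq
  intro j
  rw [Nat.testBit_and, testBit_add_pow ha, testBit_add_pow hb, testBit_add_pow hab,
      Nat.testBit_and]
  cases hj : decide (j = m) <;> cases a.testBit j <;> cases b.testBit j <;> simp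

theorem ones_zero : ones 0 = 0 := by rw [ones]; simp

theorem ones_add_pow {m : Nat} : ∀ a, a < 2 ^ m → ones (a + 2 ^ m) = ones a + 1 := by
  intro a
  induction a using Nat.strong_induction_on with
  | _ a ih =>
    intro ha
    rcases Nat.eq_zero_or_pos a with rfl | hpos
    · have hz : (2:Nat) ^ m &&& (2 ^ m - 1) = 0 := by
        apply Nat.eq_of_testBit_eq
        intro j
        rw [Nat.testBit_and, Nat.zero_testBit]
        by_cases hj : j = m
        · subst hj
          rw [Nat.testBit_eq_false_of_lt (show 2 ^ j - 1 < 2 ^ j by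
            have := Nat.two_pow_pos j; omega)]
          simp
        · rw [Nat.testBit_two_pow_of_ne (by omega)]; simp
      rw [ones]
      simp only [Nat.zero_add]
      rw [dif_neg (Nat.two_pow_pos m).ne', hz, ones_zero]
    · have hne : a + 2 ^ m ≠ 0 := by omega
      have hsub : a + 2 ^ m - 1 = (a - 1) + 2 ^ m := by omega
      have hand : (a + 2 ^ m) &&& (a + 2 ^ m - 1) = (a &&& (a - 1)) + 2 ^ m := by
        rw [hsub]; exact and_add_pow ha (by omega)
      have hlt : a &&& (a - 1) < a := by
        have : a &&& (a - 1) ≤ a - 1 := Nat.and_le_right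
        omega
      rw [ones, dif_neg hne, hand, ih _ hlt (by omega)]
      conv_rhs => rw [ones, dif_neg (show a ≠ 0 by omega)]

theorem testBit_maskOf (P : Nat → Bool) (n j : Nat) :
    (maskOf P n).testBit j = (decide (j < n) && P j) := by
  induction n with
  | zero => simp [maskOf, Nat.zero_testBit]
  | succ n ih =>
    have key : j ≠ n → (decide (j < n) && P j) = (decide (j < n + 1) && P j) := by
      intro hj
      by_cases h : j < n
      · have h2 : j < n + 1 := by omega
        simp [h, h2]
      · have h2 : ¬ (j < n + 1) := by omega
        simp [h, h2]
    simp only [maskOf]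
    by_cases hP : P n
    · rw [hP, if_pos rfl, testBit_add_pow (maskOf_lt P n), ih]
      by_cases hj : j = n
      · subst hj; simp [hP]
      · rw [decide_eq_false hj, Bool.or_false]
        exact key hj
    · rw [if_neg (by simp [hP]), Nat.add_zero, ih]
      by_cases hj : j = n
      · subst hj; simp [hP]
      · exact key hj

theorem maskOf_or_pow {P : Nat → Bool} {n v : Nat} (h : v < n) :
    maskOf P n ||| 2 ^ v = maskOf (fun j => P j || decide (j = v)) n := by
  apply Nat.eq_of_testBit_eq
  intro j
  rw [Nat.testBit_or, testBit_maskOf, testBit_maskOf]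
  by_cases hj : j = v
  · subst hj; rw [Nat.testBit_two_pow_self]; simp [h]
  · rw [Nat.testBit_two_pow_of_ne (by omega)]; simp [hj]

theorem maskOf_congr {P Q : Nat → Bool} {n : Nat} (h : ∀ j, j < n → P j = Q j) :
    maskOf P n = maskOf Q n := by
  induction n with
  | zero => rfl
  | succ n ih =>
    simp only [maskOf]
    rw [ih (fun j hj => h j (by omega)), h n (by omega)]

theorem maskOf_false {P : Nat → Bool} {n : Nat} (h : ∀ j, j < n → P j = false) :
    maskOf P n = 0 := by
  induction n with
  | zero => rfl
  | succ n ih =>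
    simp only [maskOf]
    rw [ih (fun j hj => h j (by omega)), h n (by omega)]
    simp

theorem maskOf_single {n v : Nat} (h : v < n) :
    maskOf (fun j => decide (j = v)) n = 2 ^ v := by
  induction n with
  | zero => omega
  | succ n ih =>
    simp only [maskOf]
    by_cases hv : v = n
    · subst hv
      rw [maskOf_false (fun j hj => by simp; omega)]
      simp
    · rw [ih (by omega)]
      simp [Ne.symm hv]

theorem ones_maskOf (P : Nat → Bool) (n : Nat) :
    ones (maskOf P n) = (List.range n).countP P := by
  induction n with
  | zero => simp [maskOf, ones_zero]
  | succ n ih =>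
    rw [List.range_succ, List.countP_append]
    simp only [maskOf, List.countP_cons, List.countP_nil]
    by_cases hP : P n
    · rw [hP, if_pos rfl, ones_add_pow _ (maskOf_lt P n), ih]; simp
    · have hPf : P n = false := Bool.eq_false_iff.mpr hP
      rw [if_neg (by simp [hP]), Nat.add_zero, ih]
      simp [hPf]

-- A's inner loop `for i in range(26): since_last[i] |= m` characterised
theorem foldl_set_or_getD (m : Nat) :
    ∀ (k : Nat) (l : List Nat), k ≤ l.length →
      ((List.range k).foldl (fun l i => l.set i ((l.getD i 0) ||| m)) l).length = l.length ∧
      ∀ j, ((List.range k).foldl (fun l i => l.set i ((l.getD i 0) ||| m)) l).getD j 0 =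
            if j < k then l.getD j 0 ||| m else l.getD j 0 := by
  intro k
  induction k with
  | zero => intro l _; simp
  | succ k ih =>
    intro l hk
    obtain ⟨ihlen, ihget⟩ := ih l (by omega)
    rw [List.range_succ, List.foldl_append]
    simp only [List.foldl_cons, List.foldl_nil]
    set r := (List.range k).foldl (fun l i => l.set i ((l.getD i 0) ||| m)) l with hr
    have hrk : r.getD k 0 = l.getD k 0 := by rw [ihget]; simp
    constructor
    · rw [List.length_set, ihlen]
    · intro j
      rw [getD_set, hrk, ihget]
      by_cases hj : k = j
      · subst hj
        rw [if_pos ⟨rfl, by omega⟩, if_pos (by omega)]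
      · rw [if_neg (fun hc => hj hc.1)]
        by_cases hj2 : j < k
        · rw [if_pos hj2, if_pos (by omega)]
        · rw [if_neg hj2, if_neg (by omega)]

-- the coupling invariant between A's bitmask list and B's last-occurrence list
def LoopInv (sl : List Nat) (last : List Int) (i : Int) : Prop :=
  sl.length = 26 ∧ last.length = 26 ∧ (∀ j, j < 26 → last.getD j (-1) < i) ∧
  ∀ v, v < 26 → sl.getD v 0 = maskOf (fun j => decide (last.getD v (-1) < last.getD j (-1))) 26

theorem LoopInv_step {sl : List Nat} {last : List Int} {i : Int} (h : LoopInv sl last i)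
    {val : Nat} (hv : val < 26) :
    LoopInv (((List.range 26).foldl (fun l j => l.set j ((l.getD j 0) ||| (1 <<< val))) sl).set val 0)
        (last.set val i) (i + 1) := by
  obtain ⟨hsl, hlast, hbnd, hmask⟩ := h
  obtain ⟨hrl, hrg⟩ := foldl_set_or_getD (1 <<< val) 26 sl (by omega)
  have hlget : ∀ j, (last.set val i).getD j (-1) = if val = j then i else last.getD j (-1) := by
    intro j
    rw [getD_set]
    simp only [hlast]
    by_cases hj : val = j
    · rw [if_pos ⟨hj, hv⟩, if_pos hj]
    · rw [if_neg (fun hc => hj hc.1), if_neg hj]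
  refine ⟨by rw [List.length_set, hrl, hsl], by rw [List.length_set, hlast], ?_, ?_⟩
  · intro j hj
    rw [hlget]
    by_cases hjv : val = j
    · rw [if_pos hjv]; omega
    · rw [if_neg hjv]
      have := hbnd j hj
      omega
  · intro v hvlt
    rw [getD_set]
    by_cases hveq : val = v
    · rw [if_pos ⟨hveq, by rw [hrl, hsl]; omega⟩]
      refine (maskOf_false ?_).symm
      intro j hj
      rw [hlget j, hlget v, if_pos hveq]
      by_cases hjv : val = j
      · rw [if_pos hjv]; simp
      · rw [if_neg hjv]
        have := hbnd j hj
        simp only [decide_eq_false_iff_not]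
        omega
    · rw [if_neg (fun hc => hveq hc.1), hrg, if_pos hvlt, hmask v hvlt,
          Nat.one_shiftLeft, maskOf_or_pow hv]
      apply maskOf_congr
      intro j hj
      rw [hlget j, hlget v, if_neg hveq]
      by_cases hjv : val = j
      · subst hjv
        rw [if_pos rfl]
        have := hbnd v hvlt
        simp only [decide_true, Bool.or_true]
        exact (decide_eq_true this).symm
      · rw [if_neg hjv,
            show decide (j = val) = false from decide_eq_false (fun hc => hjv hc.symm),
            Bool.or_false]

theorem inc_eq {sl : List Nat} {last : List Int} {i : Int} (h : LoopInv sl last i)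
    {val : Nat} (hv : val < 26) :
    ones (sl.getD val 0) =
      (List.range 26).countP (fun j => decide (last.getD val (-1) < last.getD j (-1))) := by
  rw [h.2.2.2 val hv, ones_maskOf]

theorem loop_eq : ∀ (cs : List Char) (t : Int) (sl : List Nat) (last : List Int) (i : Int),
    (∀ c ∈ cs, 97 ≤ c.toNat ∧ c.toNat ≤ 122) → LoopInv sl last i →
    (cs.foldl stepA (t, sl)).1 = (cs.foldl stepB (t, last, i)).1 := by
  intro cs
  induction cs with
  | nil => intro t sl last i _ _; rfl
  | cons c rest ih =>
    intro t sl last i hlc hinv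
    have hc := hlc c (by simp)
    have hval : c.toNat - 97 < 26 := by omega
    simp only [List.foldl_cons, stepA, stepB]
    rw [inc_eq hinv hval]
    exact ih _ _ _ _ (fun x hx => hlc x (by simp [hx])) (LoopInv_step hinv hval)

theorem last0_getD (z v : Nat) (hz : z < 26) :
    ((List.replicate 26 (-1 : Int)).set z 0).getD v (-1) = if v = z then 0 else -1 := by
  have hrep : (List.replicate 26 (-1 : Int)).getD v (-1) = -1 := by
    rw [List.getD_eq_getElem?_getD, List.getElem?_replicate]
    split_ifs <;> rfl
  rw [getD_set, hrep]
  simp only [List.length_replicate]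
  by_cases hv : v = z
  · subst hv; rw [if_pos ⟨rfl, hz⟩, if_pos rfl]
  · rw [if_neg (fun hc => hv hc.1.symm), if_neg hv]

theorem init_getD (z v : Nat) (hz : z ≤ 25) (hv : v < 26) :
    (List.replicate z ((1:Nat) <<< z) ++ [0] ++ List.replicate (25 - z) (1 <<< z)).getD v 0 =
      if v = z then 0 else 2 ^ z := by
  rw [List.append_assoc]
  simp only [List.getD_eq_getElem?_getD, List.getElem?_append, List.length_replicate]
  by_cases h1 : v < z
  · rw [if_pos h1, List.getElem?_replicate, if_pos h1, if_neg (by omega)]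
    simp [Nat.one_shiftLeft]
  · rw [if_neg h1]
    by_cases h2 : v = z
    · subst h2; simp
    · have h3 : ¬ (v - z < [(0:Nat)].length) := by simp; omega
      have h5 : v - z - [(0:Nat)].length = v - z - 1 := by simp
      rw [if_neg h3, h5, List.getElem?_replicate, if_pos (by omega)]
      simp [Nat.one_shiftLeft, h2]

theorem LoopInv_init (z : Nat) (hz : z < 26) :
    LoopInv (List.replicate z ((1:Nat) <<< z) ++ [0] ++ List.replicate (25 - z) (1 <<< z))
        ((List.replicate 26 (-1 : Int)).set z 0) 1 := by
  refine ⟨?_, by rw [List.length_set, List.length_replicate], ?_, ?_⟩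
  · simp only [List.length_append, List.length_replicate, List.length_cons, List.length_nil]
    omega
  · intro j hj
    rw [last0_getD z j hz]
    split_ifs <;> omega
  · intro v hv
    rw [init_getD z v (by omega) hv]
    by_cases hveq : v = z
    · rw [if_pos hveq]
      refine (maskOf_false ?_).symm
      intro j hj
      rw [last0_getD z v hz, last0_getD z j hz, if_pos hveq]
      split_ifs <;> simp
    · rw [if_neg hveq, ← maskOf_single hz]
      apply maskOf_congr
      intro j hj
      rw [last0_getD z v hz, last0_getD z j hz, if_neg hveq]
      by_cases hjz : j = z
      · rw [if_pos hjz]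
        simp [hjz]
      · rw [if_neg hjz]
        simp [hjz]

-- ===== VERDICT (by name: the statement is the Claim_ definition above) =====
theorem count_spec : Claim_equal_count := by
  intro w _ hpre
  obtain ⟨hne, hall⟩ := hpre
  have hlc : ∀ c ∈ w.toList, 97 ≤ c.toNat ∧ c.toNat ≤ 122 := by
    intro c hc
    have := List.all_eq_true.mp hall c hc
    simp at this
    exact this
  unfold Spec_count count count_alt
  cases hcs : w.toList with
  | nil => exact absurd hcs hne
  | cons c rest =>
    have hc : 97 ≤ c.toNat ∧ c.toNat ≤ 122 := hlc c (by rw [hcs]; simp)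
    have hz : c.toNat - 97 < 26 := by omega
    simp only [List.headD, List.drop_one, List.tail_cons]
    exact loop_eq rest 0 _ _ 1 (fun x hx => hlc x (by rw [hcs]; simp [hx])) (LoopInv_init _ hz)
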